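-- pv_equiv track=rewrite | github.com/Akshat1931/Test-ai | app.py | format_phi3_prompt
-- ===== SOURCE A (Python) =====
-- def format_phi3_prompt(message, history):
--     """Format the prompt for Phi-3"""
--     # Start with a system prompt to guide model behavior
--     prompt = "<|system|>\nYou are a helpful, accurate, and educational AI assistant. You provide informative, concise, and helpful responses to questions on any academic or educational topic. You aim to explain concepts clearly and help students learn effectively.\n\n"
--
--     # Add conversation history
--     for i in range(0, len(history), 2):
--         if i < len(history):
--             prompt += f"<|user|>\n{history[i]}\n\n"
--         if i+1 < len(history):
--             prompt += f"<|assistant|>\n{history[i+1]}\n\n"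
--
--     # Add the current message
--     prompt += f"<|user|>\n{message}\n\n<|assistant|>\n"
--
--     return prompt
-- ===== SOURCE B (Python) =====
-- def format_phi3_prompt(message, history):
--     """Format the prompt for Phi-3 (per-element traversal with parity-chosen role tags)."""
--     system = "<|system|>\nYou are a helpful, accurate, and educational AI assistant. You provide informative, concise, and helpful responses to questions on any academic or educational topic. You aim to explain concepts clearly and help students learn effectively.\n\n"
--     parts = [f"<|{'user' if i % 2 == 0 else 'assistant'}|>\n{item}\n\n"
--              for i, item in enumerate(history)]
--     return system + "".join(parts) + f"<|user|>\n{message}\n\n<|assistant|>\n"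
-- ===== Notes on version B (the rewrite author's own statement) =====
-- stated objective: simpler
-- what changed: Replaces the pair-stepping range(0, len, 2) loop with bounds-guarded indexing by a single enumerate pass that picks the role tag from each element's index parity and joins the collected segments.
import Mathlib
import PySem

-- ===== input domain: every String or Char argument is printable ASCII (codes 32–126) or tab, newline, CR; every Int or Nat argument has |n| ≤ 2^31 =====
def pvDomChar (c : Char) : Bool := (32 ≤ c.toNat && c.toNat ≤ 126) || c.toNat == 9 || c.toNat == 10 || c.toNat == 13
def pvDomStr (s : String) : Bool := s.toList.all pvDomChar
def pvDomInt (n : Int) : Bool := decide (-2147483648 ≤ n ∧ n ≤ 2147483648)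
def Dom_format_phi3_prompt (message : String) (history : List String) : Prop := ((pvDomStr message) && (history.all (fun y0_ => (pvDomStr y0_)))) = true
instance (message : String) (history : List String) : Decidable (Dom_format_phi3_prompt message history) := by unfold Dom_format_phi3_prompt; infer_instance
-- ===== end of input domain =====

-- B replaces A's pair-stepping indexed loop by a single enumerate pass choosing the role tag by index parity; objective: simpler.
-- ===== PORT A =====
def pvSys : String := "<|system|>\nYou are a helpful, accurate, and educational AI assistant. You provide informative, concise, and helpful responses to questions on any academic or educational topic. You aim to explain concepts clearly and help students learn effectively.\n\n"

def format_phi3_prompt (message : String) (history : List String) : String :=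
  let prompt := pvSys
  let prompt := (PySem.List.pyRange 0 (history.length : Int) 2).foldl
    (fun prompt i =>
      let prompt := if i < (history.length : Int) then
          prompt ++ "<|user|>\n" ++ PySem.List.pyGetD history i "" ++ "\n\n" else prompt
      if i + 1 < (history.length : Int) then
          prompt ++ "<|assistant|>\n" ++ PySem.List.pyGetD history (i + 1) "" ++ "\n\n" else prompt)
    prompt
  prompt ++ "<|user|>\n" ++ message ++ "\n\n<|assistant|>\n"

-- B-side helper: one formatted segment per history element
def pvSeg (p : Int × String) : String :=
  "<|" ++ (if p.1 % 2 == 0 then "user" else "assistant") ++ "|>\n" ++ p.2 ++ "\n\n"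

-- ===== PORT B =====
def format_phi3_prompt_alt (message : String) (history : List String) : String :=
  pvSys ++ String.join ((PySem.List.enumerate history 0).map pvSeg)
    ++ "<|user|>\n" ++ message ++ "\n\n<|assistant|>\n"


-- ===== PRECONDITION & SPEC =====
def Spec_format_phi3_prompt (message : String) (history : List String) (out : String) : Prop := out = format_phi3_prompt_alt message history
instance (message : String) (history : List String) (out : String) : Decidable (Spec_format_phi3_prompt message history out) := by unfold Spec_format_phi3_prompt; infer_instance

-- ===== CLAIM =====
def Claim_equal_format_phi3_prompt : Prop := ∀ (message : String) (history : List String), Dom_format_phi3_prompt message history → Spec_format_phi3_prompt message history (format_phi3_prompt message history)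

-- ===== LEMMAS AND PROOFS =====

lemma pv_join_cons (a : String) (l : List String) : String.join (a :: l) = a ++ String.join l := by
  have key : ∀ (l : List String) (x : String), List.foldl (fun r s => r ++ s) x l = x ++ List.foldl (fun r s => r ++ s) "" l := by
    intro l
    induction l with
    | nil => intro x; simp
    | cons b t ih =>
      intro x
      simp only [List.foldl]
      rw [ih (x ++ b), ih ("" ++ b)]
      simp [String.append_assoc]
  simp only [String.join]
  rw [List.foldl_cons, key, String.empty_append]

lemma pv_getD_shift (a : String) (l : List String) (i : Int) (h : 0 ≤ i) :
    PySem.List.pyGetD (a :: l) (i + 1) "" = PySem.List.pyGetD l i "" := by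
  simp only [PySem.List.pyGetD, PySem.List.pyGet?, PySem.List.pyIdx?, List.length_cons]
  split_ifs with h1 h2 h3 h4 <;> try omega
  · have : (i + 1).toNat = i.toNat + 1 := by omega
    simp [this]
  · simp

lemma pv_range2_step (n : Nat) :
    PySem.List.pyRange 0 ((n : Int) + 2) 2 = 0 :: (PySem.List.pyRange 0 (n : Int) 2).map (· + 2) := by
  rw [PySem.List.pyRange_of_pos _ _ (by norm_num), PySem.List.pyRange_of_pos _ _ (by norm_num)]
  have hc : (if (0:Int) < (n : Int) + 2 then (((n : Int) + 2 - 0 + 2 - 1) / 2).toNat else 0)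
      = (if (0:Int) < (n : Int) then (((n : Int) - 0 + 2 - 1) / 2).toNat else 0) + 1 := by
    split_ifs <;> omega
  rw [hc, List.range_succ_eq_map]
  simp only [List.map_cons, List.map_map]
  refine congrArg₂ List.cons (by norm_num) ?_
  congr 1

lemma pv_enum_shift (t : List String) : ∀ (s : Int),
    (PySem.List.enumerate t (s + 2)).map pvSeg = (PySem.List.enumerate t s).map pvSeg := by
  induction t with
  | nil => intro s; simp [PySem.List.enumerate_nil]
  | cons a r ih =>
    intro s
    rw [PySem.List.enumerate_cons, PySem.List.enumerate_cons, List.map_cons, List.map_cons]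
    have h1 : (s + 2) % 2 = s % 2 := by omega
    have h2 : s + 2 + 1 = (s + 1) + 2 := by ring
    rw [h2, ih (s + 1)]
    simp [pvSeg, h1]

lemma pvSeg_even (i : Int) (x : String) (h : i % 2 = 0) :
    pvSeg (i, x) = "<|user|>\n" ++ x ++ "\n\n" := by
  simp [pvSeg, h]

lemma pvSeg_odd (i : Int) (x : String) (h : i % 2 = 1) :
    pvSeg (i, x) = "<|assistant|>\n" ++ x ++ "\n\n" := by
  simp [pvSeg, h]

lemma pv_loop_eq : ∀ (hist : List String) (acc : String),
    (PySem.List.pyRange 0 (hist.length : Int) 2).foldl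
      (fun prompt i =>
        let prompt := if i < (hist.length : Int) then
            prompt ++ "<|user|>\n" ++ PySem.List.pyGetD hist i "" ++ "\n\n" else prompt
        if i + 1 < (hist.length : Int) then
            prompt ++ "<|assistant|>\n" ++ PySem.List.pyGetD hist (i + 1) "" ++ "\n\n" else prompt)
      acc
    = acc ++ String.join ((PySem.List.enumerate hist 0).map pvSeg)
  | [], acc => by
      simp [PySem.List.pyRange_of_pos (0:Int) 0 (by norm_num : (0:Int) < 2),
        PySem.List.enumerate_nil, String.join]
  | [a], acc => by
      have hr : PySem.List.pyRange 0 1 2 = [0] := by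
        rw [PySem.List.pyRange_of_pos _ _ (by norm_num : (0:Int) < 2)]
        norm_num
      simp only [List.length_cons, List.length_nil, Nat.zero_add, Nat.cast_one]
      rw [hr]
      simp [List.foldl, PySem.List.pyGetD, PySem.List.pyGet?, PySem.List.pyIdx?,
        PySem.List.enumerate_cons, PySem.List.enumerate_nil, pvSeg_even,
        String.join, String.append_assoc]
  | a :: b :: t, acc => by
      simp only [List.length_cons]
      have hcast : ((t.length + 1 + 1 : Nat) : Int) = (t.length : Int) + 2 := by push_cast; ring
      simp only [hcast]
      rw [pv_range2_step, List.foldl_cons]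
      have c1 : (0 : Int) < (t.length : Int) + 2 := by omega
      have c2 : (0 : Int) + 1 < (t.length : Int) + 2 := by omega
      have g0 : PySem.List.pyGetD (a :: b :: t) 0 "" = a := by
        simp [PySem.List.pyGetD, PySem.List.pyGet?, PySem.List.pyIdx?,
          (show (0:Int) ≤ (t.length : Int) + 1 by omega)]
      have g1 : PySem.List.pyGetD (a :: b :: t) (0 + 1) "" = b := by
        simp [PySem.List.pyGetD, PySem.List.pyGet?, PySem.List.pyIdx?]
      simp only [if_pos c1, if_pos c2, g0, g1, List.foldl_map]
      rw [PySem.List.foldl_congr_mem _ _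
        (fun prompt j =>
          let prompt := if j < (t.length : Int) then
              prompt ++ "<|user|>\n" ++ PySem.List.pyGetD t j "" ++ "\n\n" else prompt
          if j + 1 < (t.length : Int) then
              prompt ++ "<|assistant|>\n" ++ PySem.List.pyGetD t (j + 1) "" ++ "\n\n" else prompt)
        _ ?_]
      · rw [pv_loop_eq t _]
        rw [PySem.List.enumerate_cons, PySem.List.enumerate_cons]
        have h2 : (0 : Int) + 1 + 1 = 0 + 2 := by ring
        rw [h2, List.map_cons, List.map_cons, pv_enum_shift t 0, pv_join_cons, pv_join_cons,
          pvSeg_even 0 a (by decide), pvSeg_odd (0 + 1) b (by decide)]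
        simp only [String.append_assoc]
      · intro acc' j hj
        obtain ⟨hj0, hjlt, -⟩ := (PySem.List.mem_pyRange_iff_of_pos (by norm_num) j).1 hj
        have s1 : PySem.List.pyGetD (a :: b :: t) (j + 2) "" = PySem.List.pyGetD t j "" := by
          rw [show j + 2 = (j + 1) + 1 by ring, pv_getD_shift _ _ _ (by omega),
            pv_getD_shift _ _ _ hj0]
        have s2 : PySem.List.pyGetD (a :: b :: t) (j + 2 + 1) "" = PySem.List.pyGetD t (j + 1) "" := by
          rw [show j + 2 + 1 = ((j + 1) + 1) + 1 by ring, pv_getD_shift _ _ _ (by omega),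
            pv_getD_shift _ _ _ (by omega)]
        simp only [s1, s2, show (j + 2 < (t.length : Int) + 2) ↔ (j < (t.length : Int)) from by omega,
          show (j + 2 + 1 < (t.length : Int) + 2) ↔ (j + 1 < (t.length : Int)) from by omega]


-- ===== VERDICT =====
theorem format_phi3_prompt_spec : Claim_equal_format_phi3_prompt := by
  intro message history _
  unfold Spec_format_phi3_prompt
  simp only [format_phi3_prompt, format_phi3_prompt_alt]
  rw [pv_loop_eq]
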